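-- pv_equiv track=rewrite | github.com/derrickweiruluo/optimizedLeetcode | Companies/BBG/Design/723 Candy Crush.py | candy_crush
-- ===== SOURCE A (Python) =====
-- def candy_crush(col):
--     if not col:
--         return col
--
--     stack = []
--     stack.append([col[0], 1])
--
--     for i in range(1, len(col)):
--         if col[i] != col[i-1]:
--             if stack[-1][1] >= 3:
--                 stack.pop()
--             if stack and stack[-1][0] == col[i]:
--                 stack[-1][1] += 1
--             else:
--                 stack.append([col[i], 1])
--         else:
--             stack[-1][1] += 1
--
--     # handle end
--     if stack[-1][1] >= 3:
--         stack.pop()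
--
--     out = []
--     for ltrs in stack:
--         out += ltrs[0] * ltrs[1]
--
--     return ''.join(out)
-- ===== SOURCE B (Python) =====
-- def candy_crush(col):
--     # repeatedly delete the leftmost maximal run of >= 3 equal chars until none remains
--     while True:
--         n = len(col)
--         i = 0
--         removed = False
--         while i < n:
--             j = i
--             while j < n and col[j] == col[i]:
--                 j += 1
--             if j - i >= 3:
--                 col = col[:i] + col[j:]
--                 removed = True
--                 break
--             i = j
--         if not removed:
--             return col
-- ===== Notes on version B (the rewrite author's own statement) =====
-- stated objective: alternative
-- what changed: A's single pass with a run-length stack (pop-and-merge for cascades) is replaced by a fixpoint loop that repeatedly scans for the leftmost maximal run of >=3 equal characters and deletes it until no such run remains.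
import Mathlib
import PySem

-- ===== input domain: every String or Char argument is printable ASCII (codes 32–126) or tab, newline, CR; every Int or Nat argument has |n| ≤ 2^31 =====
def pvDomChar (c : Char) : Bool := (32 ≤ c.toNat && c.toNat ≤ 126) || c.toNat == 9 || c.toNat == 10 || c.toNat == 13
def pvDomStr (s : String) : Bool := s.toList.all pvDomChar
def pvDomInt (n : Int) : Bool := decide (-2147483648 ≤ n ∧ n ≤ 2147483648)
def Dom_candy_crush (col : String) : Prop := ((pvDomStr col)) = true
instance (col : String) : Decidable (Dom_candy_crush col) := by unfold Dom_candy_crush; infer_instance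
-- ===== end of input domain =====

-- One honest line: B replaces A's stack pass by repeated scan-and-delete of the
-- leftmost run of length ≥ 3 until a fixpoint; same result, different algorithm.

-- ===== PORT A =====
-- A's loop: state is the stack (head = top, as Python's stack[-1]) and the
-- previous character; branches are in A's order.
def candyLoop : List (Char × Int) → Char → List Char → List (Char × Int)
  | stack, _prev, [] => stack
  | stack, prev, c :: rest =>
    let stack' :=
      if c ≠ prev then
        -- if stack[-1][1] >= 3: stack.pop()
        let s1 := match stack with
          | (tc, tk) :: tl => if tk ≥ 3 then tl else (tc, tk) :: tl
          | [] => []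
        -- if stack and stack[-1][0] == col[i]: merge else: push
        match s1 with
        | (tc, tk) :: tl => if tc = c then (tc, tk + 1) :: tl else (c, 1) :: (tc, tk) :: tl
        | [] => [(c, 1)]
      else
        -- stack[-1][1] += 1
        match stack with
        | (tc, tk) :: tl => (tc, tk + 1) :: tl
        | [] => []
    candyLoop stack' c rest

-- handle end + ''.join(out); Python iterates the stack bottom-first, i.e. our list reversed
def candyOut (stack : List (Char × Int)) : String :=
  let stack := match stack with
    | (tc, tk) :: tl => if tk ≥ 3 then tl else (tc, tk) :: tl
    | [] => []
  String.mk ((stack.reverse).foldl (fun acc p => acc ++ List.replicate p.2.toNat p.1) [])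

def candy_crush (col : String) : String :=
  match col.toList with
  | [] => col
  | c :: rest => candyOut (candyLoop [(c, 1)] c rest)

-- ===== PORT B =====
-- inner while: length of the maximal run of c at the front, and what follows it
def splitRun (c : Char) : List Char → Nat × List Char
  | [] => (0, [])
  | d :: ds => if d = c then let p := splitRun c ds; (p.1 + 1, p.2) else (0, d :: ds)

-- termination helper for crushOnce (cited in decreasing_by)
theorem splitRun_len (c : Char) (cs : List Char) :
    (splitRun c cs).1 + (splitRun c cs).2.length = cs.length := by
  induction cs with
  | nil => simp [splitRun]
  | cons d ds ih =>
    simp only [splitRun]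
    split
    · simp; omega
    · simp

-- one middle-while scan: delete the leftmost maximal run of ≥ 3, none if no such run
def crushOnce : List Char → Option (List Char)
  | [] => none
  | c :: cs =>
    let p := splitRun c cs
    if p.1 + 1 ≥ 3 then some p.2
    else match crushOnce p.2 with
      | none => none
      | some t => some (c :: List.replicate p.1 c ++ t)
termination_by l => l.length
decreasing_by
  have := splitRun_len c cs
  simp only [List.length_cons]; omega

-- outer while True: iterate to a fixpoint (fuel = |col| bounds the deletions)
def crushFix : Nat → List Char → List Char
  | 0, s => s
  | fuel + 1, s =>
    match crushOnce s with
    | none => s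
    | some t => crushFix fuel t

def candy_crush_alt (col : String) : String :=
  String.mk (crushFix col.toList.length col.toList)

-- ===== PRECONDITION & SPEC =====
def Spec_candy_crush (col : String) (out : String) : Prop := out = candy_crush_alt col
instance (col : String) (out : String) : Decidable (Spec_candy_crush col out) := by unfold Spec_candy_crush; infer_instance

-- ===== CLAIM (what is proved, stated in full; the proofs are below) =====
def Claim_equal_candy_crush : Prop := ∀ (col : String), Dom_candy_crush col → Spec_candy_crush col (candy_crush col)

-- ===== LEMMAS AND PROOFS =====

-- prev-free reformulation of A's step (valid because the stack top's char equals prev)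
def mstep (σ : List (Char × Int)) (c : Char) : List (Char × Int) :=
  match σ with
  | [] => [(c, 1)]
  | (tc, tk) :: tl =>
    if tc = c then (tc, tk + 1) :: tl
    else
      let s1 := if tk ≥ 3 then tl else (tc, tk) :: tl
      match s1 with
      | (t2, k2) :: tl2 => if t2 = c then (t2, k2 + 1) :: tl2 else (c, 1) :: (t2, k2) :: tl2
      | [] => [(c, 1)]

def popIf3 (σ : List (Char × Int)) : List (Char × Int) :=
  match σ with
  | (tc, tk) :: tl => if tk ≥ 3 then tl else (tc, tk) :: tl
  | [] => []

def outList (σ : List (Char × Int)) : List Char :=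
  (σ.reverse).foldl (fun acc p => acc ++ List.replicate p.2.toNat p.1) []

-- all stack counts are in [1,3)
def allQ (σ : List (Char × Int)) : Prop := ∀ p ∈ σ, 1 ≤ p.2 ∧ p.2 < 3

-- top char differs from c (vacuous for the empty stack)
def topNe (σ : List (Char × Int)) (c : Char) : Prop :=
  match σ with
  | [] => True
  | (tc, _) :: _ => tc ≠ c

def topNeHead (σ : List (Char × Int)) (cs : List Char) : Prop :=
  match cs with
  | [] => True
  | c :: _ => topNe σ c

theorem candyOut_eq (σ : List (Char × Int)) :
    candyOut σ = String.mk (outList (popIf3 σ)) := by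
  cases σ with
  | nil => rfl
  | cons p tl => cases p; simp [candyOut, popIf3, outList]

theorem bridge (cs : List Char) : ∀ (k : Int) (tl : List (Char × Int)) (prev : Char),
    candyLoop ((prev, k) :: tl) prev cs = List.foldl mstep ((prev, k) :: tl) cs := by
  induction cs with
  | nil => intro k tl prev; rfl
  | cons c rest ih =>
    intro k tl prev
    by_cases h : c = prev
    · subst h
      simp only [candyLoop, if_neg (show ¬(c ≠ c) by simp), List.foldl]
      have hm : mstep ((c, k) :: tl) c = (c, k + 1) :: tl := by simp [mstep]
      rw [hm]
      exact ih _ _ _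
    · simp only [candyLoop, if_pos h, List.foldl, mstep, if_neg (Ne.symm h)]
      by_cases h3 : k ≥ 3
      · simp only [if_pos h3]
        cases tl with
        | nil => exact ih _ _ _
        | cons q tl2 =>
          cases q with
          | mk t2 k2 =>
            by_cases he : t2 = c
            · subst he; simp only [if_pos rfl]; exact ih _ _ _
            · simp only [if_neg he]; exact ih _ _ _
      · simp only [if_neg h3, if_neg (Ne.symm h)]
        exact ih _ _ _

theorem mstep_push (σ : List (Char × Int)) (c : Char)
    (hQ : allQ σ) (hne : topNe σ c) : mstep σ c = (c, 1) :: σ := by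
  cases σ with
  | nil => rfl
  | cons p tl =>
    cases p with
    | mk tc tk =>
      have h1 : tc ≠ c := hne
      have h2 : tk < 3 := (hQ (tc, tk) (by simp)).2
      simp [mstep, h1, not_le.mpr h2]

theorem foldl_rep (c : Char) (σ : List (Char × Int)) :
    ∀ (n : Nat) (m : Int), List.foldl mstep ((c, m) :: σ) (List.replicate n c) = (c, m + n) :: σ := by
  intro n
  induction n with
  | zero => intro m; simp
  | succ n ih =>
    intro m
    have hm : mstep ((c, m) :: σ) c = (c, m + 1) :: σ := by simp [mstep]
    rw [List.replicate_succ, List.foldl, hm, ih,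
      show m + 1 + (n : Int) = m + ((n : Int) + 1) by ring]
    push_cast
    ring_nf

theorem foldl_run (c : Char) (σ : List (Char × Int)) (n : Nat)
    (hQ : allQ σ) (hne : topNe σ c) :
    List.foldl mstep σ (List.replicate (n + 1) c) = (c, (n : Int) + 1) :: σ := by
  rw [List.replicate_succ, List.foldl, mstep_push σ c hQ hne, foldl_rep,
    show (1 : Int) + (n : Int) = (n : Int) + 1 by ring]

theorem mstep_skip (c d : Char) (m : Int) (σ : List (Char × Int))
    (hm : m ≥ 3) (hQ : allQ σ) (hne : d ≠ c) :
    mstep ((c, m) :: σ) d = mstep σ d := by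
  cases σ with
  | nil => simp [mstep, Ne.symm hne, hm]
  | cons p tl =>
    cases p with
    | mk t2 k2 =>
      have h2 : k2 < 3 := (hQ (t2, k2) (by simp)).2
      by_cases he : t2 = d
      · simp [mstep, Ne.symm hne, hm, he]
      · simp [mstep, Ne.symm hne, hm, he, not_le.mpr h2]

theorem outList_cons (c : Char) (m : Int) (σ : List (Char × Int)) :
    outList ((c, m) :: σ) = outList σ ++ List.replicate m.toNat c := by
  simp [outList, List.foldl_append]

theorem popIf3_allQ (σ : List (Char × Int)) (hQ : allQ σ) : popIf3 σ = σ := by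
  cases σ with
  | nil => rfl
  | cons p tl =>
    cases p with
    | mk tc tk => simp [popIf3, not_le.mpr (hQ (tc, tk) (by simp)).2]

theorem splitRun_spec (c : Char) (cs : List Char) :
    cs = List.replicate (splitRun c cs).1 c ++ (splitRun c cs).2 ∧
      topNeHead [(c, 1)] (splitRun c cs).2 := by
  induction cs with
  | nil => simp [splitRun, topNeHead]
  | cons d ds ih =>
    by_cases h : d = c
    · subst h
      simpa [splitRun, List.replicate_succ] using ih
    · simp [splitRun, h, topNeHead, topNe, Ne.symm h]

theorem crushOnce_shrink : ∀ (cs t : List Char), crushOnce cs = some t → t.length < cs.length := by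
  intro cs
  induction cs using (measure List.length).wf.induction with
  | _ cs ih =>
    intro t hct
    cases cs with
    | nil => simp [crushOnce] at hct
    | cons c cs' =>
      have hsp := splitRun_len c cs'
      simp only [crushOnce] at hct
      split at hct
      · next h3 =>
        have : t = (splitRun c cs').2 := by injection hct with h; exact h.symm
        subst this; simp; omega
      · next h3 =>
        cases hco : crushOnce (splitRun c cs').2 with
        | none => rw [hco] at hct; simp at hct
        | some t' =>
          rw [hco] at hct
          have ht : t = c :: List.replicate (splitRun c cs').1 c ++ t' := by
            injection hct with h; exact h.symm
          have hmeas : ((splitRun c cs').2).length < (c :: cs').length := by simp; omega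
          have hlt : t'.length < (splitRun c cs').2.length :=
            ih (splitRun c cs').2 hmeas t' hco
          subst ht; simp; omega

theorem none_case : ∀ (cs : List Char) (σ : List (Char × Int)),
    crushOnce cs = none → allQ σ → topNeHead σ cs →
    outList (popIf3 (List.foldl mstep σ cs)) = outList σ ++ cs := by
  intro cs
  induction cs using (measure List.length).wf.induction with
  | _ cs ih =>
    intro σ hn hQ hne
    cases cs with
    | nil => simp [popIf3_allQ σ hQ]
    | cons c cs' =>
      obtain ⟨hdec, hhd⟩ := splitRun_spec c cs'
      have hsp := splitRun_len c cs'
      simp only [crushOnce] at hn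
      split at hn
      · simp at hn
      · next h3 =>
        cases hco : crushOnce (splitRun c cs').2 with
        | some t' => rw [hco] at hn; simp at hn
        | none =>
          have hrw : c :: cs' = List.replicate ((splitRun c cs').1 + 1) c ++ (splitRun c cs').2 := by
            rw [List.replicate_succ]; simpa using congrArg (c :: ·) hdec
          rw [hrw, List.foldl_append, foldl_run c σ _ hQ hne]
          have hQ' : allQ ((c, ((splitRun c cs').1 : Int) + 1) :: σ) := by
            intro p hp
            rcases List.mem_cons.mp hp with h | h
            · subst h; exact ⟨by omega, by omega⟩
            · exact hQ _ h
          have hne' : topNeHead ((c, ((splitRun c cs').1 : Int) + 1) :: σ) (splitRun c cs').2 := by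
            cases hv : (splitRun c cs').2 with
            | nil => trivial
            | cons d v' => rw [hv] at hhd; exact hhd
          have hmeas : ((splitRun c cs').2).length < (c :: cs').length := by simp; omega
          rw [ih (splitRun c cs').2 hmeas _ hco hQ' hne', outList_cons]
          have : (((splitRun c cs').1 : Int) + 1).toNat = (splitRun c cs').1 + 1 := by omega
          rw [this, List.append_assoc]

theorem some_case : ∀ (cs : List Char) (σ : List (Char × Int)) (t : List Char),
    crushOnce cs = some t → allQ σ → topNeHead σ cs →
    outList (popIf3 (List.foldl mstep σ cs)) = outList (popIf3 (List.foldl mstep σ t)) := by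
  intro cs
  induction cs using (measure List.length).wf.induction with
  | _ cs ih =>
    intro σ t hct hQ hne
    cases cs with
    | nil => simp [crushOnce] at hct
    | cons c cs' =>
      obtain ⟨hdec, hhd⟩ := splitRun_spec c cs'
      have hsp := splitRun_len c cs'
      have hrw : c :: cs' = List.replicate ((splitRun c cs').1 + 1) c ++ (splitRun c cs').2 := by
        rw [List.replicate_succ]; simpa using congrArg (c :: ·) hdec
      simp only [crushOnce] at hct
      split at hct
      · next h3 =>
        have ht : t = (splitRun c cs').2 := by injection hct with h; exact h.symm
        subst ht
        rw [hrw, List.foldl_append, foldl_run c σ _ hQ hne]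
        have hm : ((splitRun c cs').1 : Int) + 1 ≥ 3 := by omega
        cases hv : (splitRun c cs').2 with
        | nil =>
          simp only [List.foldl]
          rw [popIf3_allQ σ hQ]
          simp [popIf3, hm]
        | cons d v' =>
          have hd : d ≠ c := by rw [hv] at hhd; exact Ne.symm hhd
          simp only [List.foldl]
          rw [mstep_skip c d _ σ hm hQ hd]
      · next h3 =>
        cases hco : crushOnce (splitRun c cs').2 with
        | none => rw [hco] at hct; simp at hct
        | some t' =>
          rw [hco] at hct
          have ht : t = c :: List.replicate (splitRun c cs').1 c ++ t' := by
            injection hct with h; exact h.symm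
          have hQ' : allQ ((c, ((splitRun c cs').1 : Int) + 1) :: σ) := by
            intro p hp
            rcases List.mem_cons.mp hp with h | h
            · subst h; exact ⟨by omega, by omega⟩
            · exact hQ _ h
          have hne' : topNeHead ((c, ((splitRun c cs').1 : Int) + 1) :: σ) (splitRun c cs').2 := by
            cases hv : (splitRun c cs').2 with
            | nil => trivial
            | cons d v' => rw [hv] at hhd; exact hhd
          have htrw : t = List.replicate ((splitRun c cs').1 + 1) c ++ t' := by
            rw [ht, List.replicate_succ]
          have hmeas : ((splitRun c cs').2).length < (c :: cs').length := by simp; omega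
          rw [hrw, htrw, List.foldl_append, List.foldl_append, foldl_run c σ _ hQ hne]
          exact ih (splitRun c cs').2 hmeas _ t' hco hQ' hne'

theorem main_list : ∀ (fuel : Nat) (s : List Char), s.length ≤ fuel →
    outList (popIf3 (List.foldl mstep [] s)) = crushFix fuel s := by
  intro fuel
  induction fuel with
  | zero =>
    intro s hs
    have : s = [] := List.eq_nil_of_length_eq_zero (Nat.le_zero.mp hs)
    subst this; rfl
  | succ fuel ih =>
    intro s hs
    cases hco : crushOnce s with
    | none =>
      rw [crushFix, hco]
      simpa using none_case s [] hco (by intro p hp; simp at hp) (by cases s <;> trivial)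
    | some t =>
      rw [crushFix, hco,
        some_case s [] t hco (by intro p hp; simp at hp) (by cases s <;> trivial)]
      exact ih t (by have := crushOnce_shrink s t hco; omega)

-- ===== VERDICT (by name: the statement is the Claim_ definition above) =====
theorem candy_crush_spec : Claim_equal_candy_crush := by
  intro col _
  show candy_crush col = candy_crush_alt col
  cases hl : col.toList with
  | nil =>
    have hcol : col = "" := by
      have := congrArg String.ofList hl
      simpa using this
    subst hcol
    rfl
  | cons c rest =>
    have hA : candy_crush col = candyOut (candyLoop [(c, 1)] c rest) := by
      unfold candy_crush; rw [hl]
    have hB : candy_crush_alt col = String.mk (crushFix (c :: rest).length (c :: rest)) := by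
      unfold candy_crush_alt; rw [hl]
    rw [hA, hB, bridge, candyOut_eq]
    have h0 : List.foldl mstep [(c, 1)] rest = List.foldl mstep [] (c :: rest) := rfl
    rw [h0, main_list (c :: rest).length (c :: rest) le_rfl]
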